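-- pv_equiv track=rewrite | github.com/davisr137/HackerRank | misc/equal.py | search
-- ===== SOURCE A (Python) =====
-- from heapq import heappush, heappop, heapify
-- from math import floor
--
-- def search(arr):
--     heap = []
--     for item in arr:
--         heappush(heap, -item)
--     moves = 0
--     min_val = max(heap)
--     diff = 100
--     while diff > 0:
--         max_val = heappop(heap)
--         diff = abs(max_val - min_val)
--         if diff >= 5:
--             times = floor(diff/5)
--             heappush(heap,max_val+times*5)
--         elif diff >=2:
--             times = floor(diff/2)
--             heappush(heap,max_val+times*2)
--         else:
--             times = 1
--             heappush(heap,max_val+times)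
--         moves += times
--     return(moves-1)
-- ===== SOURCE B (Python) =====
-- def search(arr):
--     m = min(arr)
--     total = 0
--     for x in arr:
--         d = x - m
--         total += d // 5 + (d % 5) // 2 + (d % 5) % 2
--     return total
-- ===== Notes on version B (the rewrite author's own statement) =====
-- stated objective: faster
-- what changed: Replaces the heap simulation (repeatedly popping the max and pushing it back after one greedy coin batch) by a single pass summing the closed-form greedy coin count d//5 + (d%5)//2 + (d%5)%2 for each element's distance d to the minimum.
import Mathlib
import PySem

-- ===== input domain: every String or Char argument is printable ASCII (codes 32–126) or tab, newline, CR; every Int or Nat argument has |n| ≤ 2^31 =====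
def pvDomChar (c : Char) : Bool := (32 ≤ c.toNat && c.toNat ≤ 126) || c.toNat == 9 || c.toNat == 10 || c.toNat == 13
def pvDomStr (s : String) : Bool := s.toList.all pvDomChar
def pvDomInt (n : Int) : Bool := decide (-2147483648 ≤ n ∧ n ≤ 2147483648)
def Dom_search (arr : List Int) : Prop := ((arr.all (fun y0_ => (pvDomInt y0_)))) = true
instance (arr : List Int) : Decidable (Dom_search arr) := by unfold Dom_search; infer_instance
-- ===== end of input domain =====

-- B replaces A's heap simulation by one pass summing the closed-form greedy coin count per element (measured asymptotically faster).

-- ===== PORT A =====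
-- Python's heapq is a min-heap on a list; A only ever observes the heap's minimum (heappop) and
-- maximum (max(heap)) of its integer MULTISET, so the heap container is ported exactly as a
-- sorted-ascending list: heappush = ordered insert, heappop = head, max(heap) = PySem.List.max?.
def heapPush (heap : List Int) (x : Int) : List Int := List.orderedInsert (· ≤ ·) x heap

-- the while loop; fuel is a totality guard only (chosen large enough at the call site; proved sufficient below).
-- floor(diff/5) / floor(diff/2) are exact integer floor divisions on the |n| ≤ 2^31 domain (floats are exact there).
def searchLoop (fuel : Nat) (minv : Int) (heap : List Int) (moves : Int) : Int :=
  match fuel, heap with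
  | 0, _ => moves
  | _+1, [] => moves      -- unreachable: the loop always pushes back before popping again
  | fuel+1, maxv :: rest =>
    let diff := |maxv - minv|
    if 5 ≤ diff then
      let times := PySem.Int.floordiv diff 5
      let moves := moves + times
      if 0 < diff then searchLoop fuel minv (heapPush rest (maxv + times * 5)) moves else moves
    else if 2 ≤ diff then
      let times := PySem.Int.floordiv diff 2
      let moves := moves + times
      if 0 < diff then searchLoop fuel minv (heapPush rest (maxv + times * 2)) moves else moves
    else
      let times : Int := 1
      let moves := moves + times
      if 0 < diff then searchLoop fuel minv (heapPush rest (maxv + times)) moves else moves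

def search (arr : List Int) : Int :=
  let heap := arr.foldl (fun h item => heapPush h (-item)) []
  match PySem.List.max? heap (fun x => x) with
  | none => 0          -- Python: max([]) raises ValueError; excluded by Pre_search
  | some minv =>
    let fuel := (heap.map (fun x => (minv - x).toNat)).sum + 1
    searchLoop fuel minv heap 0 - 1

-- ===== PORT B =====
def search_alt (arr : List Int) : Int :=
  match PySem.List.min? arr (fun x => x) with
  | none => 0          -- Python: min([]) raises ValueError; excluded by Pre_search
  | some m =>
    arr.foldl (fun total x =>
      let d := x - m
      total + PySem.Int.floordiv d 5 + PySem.Int.floordiv (PySem.Int.mod d 5) 2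
            + PySem.Int.mod (PySem.Int.mod d 5) 2) 0

-- ===== PRECONDITION & SPEC =====
-- On [] both A (max) and B (min) raise ValueError; that is the only exclusion.
def Pre_search (arr : List Int) : Prop := arr ≠ []
instance (arr : List Int) : Decidable (Pre_search arr) := by unfold Pre_search; infer_instance
def pvWitness_search : List Int := [10, 7, 12]

def Spec_search (arr : List Int) (out : Int) : Prop := out = search_alt arr
instance (arr : List Int) (out : Int) : Decidable (Spec_search arr out) := by unfold Spec_search; infer_instance

-- ===== CLAIM (what is proved, stated in full; the proofs are below) =====
def Claim_equal_search : Prop := ∀ (arr : List Int), Dom_search arr → Pre_search arr → Spec_search arr (search arr)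

-- ===== LEMMAS AND PROOFS =====

-- the greedy coin count for a single gap d (B's per-element summand)
def pvCost (d : Int) : Int :=
  PySem.Int.floordiv d 5 + PySem.Int.floordiv (PySem.Int.mod d 5) 2
    + PySem.Int.mod (PySem.Int.mod d 5) 2

lemma pvCost_ediv (d : Int) : pvCost d = d / 5 + (d % 5) / 2 + (d % 5) % 2 := by
  unfold pvCost
  rw [PySem.Int.floordiv_eq_ediv_of_pos (by norm_num : (0:Int) < 5),
      PySem.Int.mod_eq_emod_of_pos (by norm_num : (0:Int) < 5),
      PySem.Int.floordiv_eq_ediv_of_pos (by norm_num : (0:Int) < 2),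
      PySem.Int.mod_eq_emod_of_pos (by norm_num : (0:Int) < 2)]

-- measure: total remaining distance of the heap to minv
def pvMu (minv : Int) (heap : List Int) : Nat := (heap.map (fun x => (minv - x).toNat)).sum

lemma heapPush_ne_nil (l : List Int) (x : Int) : heapPush l x ≠ [] := by
  have h := (List.perm_orderedInsert (· ≤ ·) x l).length_eq
  intro hnil
  unfold heapPush at hnil
  rw [hnil] at h
  simp at h

lemma heapPush_pairwise (l : List Int) (x : Int) (h : l.Pairwise (· ≤ ·)) :
    (heapPush l x).Pairwise (· ≤ ·) := List.Pairwise.orderedInsert x l h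

lemma map_sum_heapPush (l : List Int) (x : Int) (f : Int → Int) :
    ((heapPush l x).map f).sum = f x + (l.map f).sum := by
  have h := ((List.perm_orderedInsert (· ≤ ·) x l).map f).sum_eq
  simpa using h

lemma mu_heapPush (minv : Int) (l : List Int) (x : Int) :
    pvMu minv (heapPush l x) = (minv - x).toNat + pvMu minv l := by
  unfold pvMu
  have h := ((List.perm_orderedInsert (· ≤ ·) x l).map (fun y => (minv - y).toNat)).sum_eq
  simpa using h

lemma mem_heapPush {l : List Int} {x y : Int} (h : y ∈ heapPush l x) : y = x ∨ y ∈ l := by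
  have := (List.perm_orderedInsert (· ≤ ·) x l).mem_iff.mp h
  simpa using this

lemma searchLoop_eq (minv : Int) :
    ∀ (fuel : Nat) (heap : List Int) (moves : Int),
      heap ≠ [] →
      heap.Pairwise (· ≤ ·) →
      (∀ x ∈ heap, x ≤ minv) →
      pvMu minv heap < fuel →
      searchLoop fuel minv heap moves
        = moves + 1 + (heap.map (fun x => pvCost (minv - x))).sum := by
  intro fuel
  induction fuel with
  | zero => intro heap moves _ _ _ hfuel; omega
  | succ fuel ih =>
    intro heap moves hne hpw hbd hfuel
    match heap with
    | [] => exact absurd rfl hne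
    | maxv :: rest =>
      have hmax : maxv ≤ minv := hbd maxv (by simp)
      have habs : |maxv - minv| = minv - maxv := by
        rw [abs_sub_comm]; exact abs_of_nonneg (by omega)
      have hrest : ∀ x ∈ rest, x ≤ minv := fun x hx => hbd x (by simp [hx])
      have hrestpw : rest.Pairwise (· ≤ ·) := hpw.of_cons
      have hmu : pvMu minv (maxv :: rest) = (minv - maxv).toNat + pvMu minv rest := by
        unfold pvMu; simp
      simp only [searchLoop, habs]
      by_cases h5 : 5 ≤ minv - maxv
      · rw [if_pos h5]
        have hfd : PySem.Int.floordiv (minv - maxv) 5 = (minv - maxv) / 5 :=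
          PySem.Int.floordiv_eq_ediv_of_pos (by norm_num)
        rw [if_pos (by omega : (0:Int) < minv - maxv)]
        set t := PySem.Int.floordiv (minv - maxv) 5 with ht
        have ht5 : t = (minv - maxv) / 5 := hfd
        have hle : t * 5 ≤ minv - maxv := by rw [ht5]; omega
        have hlt : minv - maxv - t * 5 < 5 := by rw [ht5]; omega
        have ht1 : 1 ≤ t := by rw [ht5]; omega
        rw [ih (heapPush rest (maxv + t * 5)) (moves + t)
            (heapPush_ne_nil _ _) (heapPush_pairwise _ _ hrestpw)
            (fun x hx => by rcases mem_heapPush hx with h | h; exacts [by omega, hrest x h])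
            (by rw [mu_heapPush]; rw [hmu] at hfuel; omega)]
        rw [map_sum_heapPush]
        simp only [List.map_cons, List.sum_cons]
        have e1 : pvCost (minv - maxv) = t + pvCost (minv - (maxv + t * 5)) := by
          rw [pvCost_ediv, pvCost_ediv, ht5]; omega
        omega
      · rw [if_neg h5]
        by_cases h2 : 2 ≤ minv - maxv
        · rw [if_pos h2]
          have hfd : PySem.Int.floordiv (minv - maxv) 2 = (minv - maxv) / 2 :=
            PySem.Int.floordiv_eq_ediv_of_pos (by norm_num)
          rw [if_pos (by omega : (0:Int) < minv - maxv)]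
          set t := PySem.Int.floordiv (minv - maxv) 2 with ht
          have ht2 : t = (minv - maxv) / 2 := hfd
          have hle : t * 2 ≤ minv - maxv := by rw [ht2]; omega
          have ht1 : 1 ≤ t := by rw [ht2]; omega
          rw [ih (heapPush rest (maxv + t * 2)) (moves + t)
              (heapPush_ne_nil _ _) (heapPush_pairwise _ _ hrestpw)
              (fun x hx => by rcases mem_heapPush hx with h | h; exacts [by omega, hrest x h])
              (by rw [mu_heapPush]; rw [hmu] at hfuel; omega)]
          rw [map_sum_heapPush]
          simp only [List.map_cons, List.sum_cons]
          have e1 : pvCost (minv - maxv) = t + pvCost (minv - (maxv + t * 2)) := by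
            rw [pvCost_ediv, pvCost_ediv, ht2]; omega
          omega
        · rw [if_neg h2]
          by_cases h1 : (0:Int) < minv - maxv
          · -- diff = 1
            rw [if_pos h1]
            have hd1 : minv - maxv = 1 := by omega
            rw [ih (heapPush rest (maxv + 1)) (moves + 1)
                (heapPush_ne_nil _ _) (heapPush_pairwise _ _ hrestpw)
                (fun x hx => by rcases mem_heapPush hx with h | h; exacts [by omega, hrest x h])
                (by rw [mu_heapPush]; rw [hmu] at hfuel; omega)]
            rw [map_sum_heapPush]
            simp only [List.map_cons, List.sum_cons]
            have e1 : pvCost (minv - maxv) = 1 + pvCost (minv - (maxv + 1)) := by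
              rw [pvCost_ediv, pvCost_ediv]; omega
            omega
          · -- diff = 0 : all remaining elements equal minv
            rw [if_neg h1]
            have hd0 : maxv = minv := by omega
            have hall : ∀ x ∈ rest, x = minv := by
              intro x hx
              have h1 := (List.pairwise_cons.mp hpw).1 x hx
              have h2 := hrest x hx
              omega
            have hzero : (rest.map (fun x => pvCost (minv - x))).sum = 0 := by
              apply List.sum_eq_zero
              intro y hy
              rcases List.mem_map.mp hy with ⟨x, hx, hxy⟩
              rw [hall x hx] at hxy
              simpa [pvCost] using hxy.symm
            simp only [List.map_cons, List.sum_cons, hd0]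
            rw [hzero]
            simp [pvCost]

lemma build_heap (l : List Int) :
    ∀ acc : List Int, acc.Pairwise (· ≤ ·) →
      (l.foldl (fun h item => heapPush h (-item)) acc).Pairwise (· ≤ ·) ∧
      (l.foldl (fun h item => heapPush h (-item)) acc).Perm (acc ++ l.map (fun a => -a)) := by
  induction l with
  | nil => intro acc hpw; simpa using hpw
  | cons x l ih =>
    intro acc hpw
    simp only [List.foldl_cons]
    obtain ⟨hp, hperm⟩ := ih (heapPush acc (-x)) (heapPush_pairwise _ _ hpw)
    refine ⟨hp, ?_⟩
    have h1 : (heapPush acc (-x) ++ l.map (fun a => -a)).Perm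
        (acc ++ (x :: l).map (fun a => -a)) := by
      simp only [List.map_cons]
      exact ((List.perm_orderedInsert (· ≤ ·) (-x) acc).append_right _).trans
        List.perm_middle.symm
    exact hperm.trans h1

-- ===== VERDICT (by name: the statement is the Claim_ definition above) =====
theorem search_spec : Claim_equal_search := by
  intro arr _ hpre
  unfold Spec_search
  obtain ⟨hpw, hperm⟩ := build_heap arr [] (by simp)
  set heap := arr.foldl (fun h item => heapPush h (-item)) [] with hheap
  have hperm' : heap.Perm (arr.map (fun a => -a)) := by simpa using hperm
  have hne : heap ≠ [] := by
    intro h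
    have := hperm'.length_eq
    rw [h] at this
    simp at this
    exact hpre (List.eq_nil_of_length_eq_zero this.symm)
  -- max of the heap and min of arr
  obtain ⟨minv, hminv⟩ : ∃ v, PySem.List.max? heap (fun x => x) = some v := by
    cases hv : PySem.List.max? heap (fun x => x) with
    | none => exact absurd ((PySem.List.max?_eq_none_iff _ _).mp hv) hne
    | some v => exact ⟨v, rfl⟩
  obtain ⟨m, hm⟩ : ∃ v, PySem.List.min? arr (fun x => x) = some v := by
    cases hv : PySem.List.min? arr (fun x => x) with
    | none => exact absurd ((PySem.List.min?_eq_none_iff _ _).mp hv) hpre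
    | some v => exact ⟨v, rfl⟩
  have hminv_mem : minv ∈ heap := PySem.List.max?_mem hminv
  have hminv_max : ∀ x ∈ heap, x ≤ minv := fun x hx => PySem.List.max?_isMax hminv x hx
  have hm_mem : m ∈ arr := PySem.List.min?_mem hm
  have hm_min : ∀ x ∈ arr, m ≤ x := fun x hx => PySem.List.min?_isMin hm x hx
  have hmv : minv = -m := by
    have h1 : -m ∈ heap := hperm'.mem_iff.mpr (List.mem_map.mpr ⟨m, hm_mem, rfl⟩)
    have h2 : -m ≤ minv := hminv_max _ h1
    rcases List.mem_map.mp (hperm'.mem_iff.mp hminv_mem) with ⟨a, ha, hav⟩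
    have := hm_min a ha
    omega
  -- evaluate port A
  have hA : search arr = searchLoop ((heap.map (fun x => (minv - x).toNat)).sum + 1) minv heap 0 - 1 := by
    rw [search, ← hheap, hminv]
  rw [hA, searchLoop_eq minv _ heap 0 hne hpw hminv_max (by unfold pvMu; omega)]
  -- evaluate port B
  have hB : search_alt arr = arr.foldl (fun total x => total + pvCost (x - m)) 0 := by
    have hfun : (fun (total x : Int) =>
        let d := x - m
        total + PySem.Int.floordiv d 5 + PySem.Int.floordiv (PySem.Int.mod d 5) 2
          + PySem.Int.mod (PySem.Int.mod d 5) 2)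
        = (fun total x => total + pvCost (x - m)) := by
      funext total x
      simp only [pvCost]
      ring
    simp only [search_alt, hm, hfun]
  rw [hB, PySem.List.foldl_add arr (fun x => pvCost (x - m)) 0]
  -- the two sums agree
  have hsum : (heap.map (fun x => pvCost (minv - x))).sum
      = (arr.map (fun x => pvCost (x - m))).sum := by
    have h := (hperm'.map (fun x => pvCost (minv - x))).sum_eq
    rw [h, List.map_map]
    congr 1
    refine List.map_congr_left ?_
    intro a _
    simp only [Function.comp]
    congr 1
    omega
  omega
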